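-- pv_equiv track=rewrite | github.com/paqui4ever/Algoritmos-y-Estructuras-de-Datos-I | Parciales Python/Parcial5.py | torneo_de_gallinas
-- ===== SOURCE A (Python) =====
-- def torneo_de_gallinas (estrategias: dict[str, str]) -> dict[str, int]:
--     puntajes = {}
--     for jugador, estrategia in estrategias.items():
--         puntajes[jugador] = 0
--         for oponente, estrategia_rival in estrategias.items():
--             if oponente != jugador:
--                 if estrategia == "Me desvio siempre":
--                     if estrategia_rival == "Me la banco y no me desvio":
--                         puntajes[jugador] -= 15
--                     else:
--                         puntajes[jugador] -= 10
--                 else: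
--                     if estrategia_rival == "Me la banco y no me desvio":
--                         puntajes[jugador] += 5
--                     else:
--                         puntajes[jugador] += 10
--
--     return puntajes
-- ===== SOURCE B (Python) =====
-- def torneo_de_gallinas(estrategias: dict[str, str]) -> dict[str, int]:
--     # One pass over strategy counts, then a closed-form score per player.
--     n = len(estrategias)
--     banco = len([e for e in estrategias.values() if e == "Me la banco y no me desvio"])
--     resto = n - banco
--     puntajes = {}
--     for jugador, estrategia in estrategias.items():
--         if estrategia == "Me desvio siempre":
--             puntajes[jugador] = -15 * banco - 10 * (resto - 1)
--         elif estrategia == "Me la banco y no me desvio":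
--             puntajes[jugador] = 5 * (banco - 1) + 10 * resto
--         else:
--             puntajes[jugador] = 5 * banco + 10 * (resto - 1)
--     return puntajes
-- ===== Notes on version B (the rewrite author's own statement) =====
-- stated objective: faster
-- what changed: Replaces the quadratic all-pairs inner loop by one pass that counts the 'Me la banco y no me desvio' strategies and assigns each player a closed-form score from that count.
import Mathlib
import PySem

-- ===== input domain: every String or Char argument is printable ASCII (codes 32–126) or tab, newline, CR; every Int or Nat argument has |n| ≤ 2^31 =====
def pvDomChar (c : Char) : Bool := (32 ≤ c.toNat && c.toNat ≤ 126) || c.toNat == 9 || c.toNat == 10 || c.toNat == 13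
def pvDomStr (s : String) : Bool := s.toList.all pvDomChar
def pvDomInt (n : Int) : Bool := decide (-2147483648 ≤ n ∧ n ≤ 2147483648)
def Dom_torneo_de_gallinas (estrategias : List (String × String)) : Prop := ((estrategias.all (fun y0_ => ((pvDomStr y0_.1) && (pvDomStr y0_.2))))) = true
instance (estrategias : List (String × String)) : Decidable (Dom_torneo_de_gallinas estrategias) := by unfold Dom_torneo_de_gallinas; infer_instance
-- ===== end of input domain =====

-- B replaces A's quadratic all-pairs loop by one strategy count plus a closed-form score per player (asymptotically faster).

-- ===== PORT A =====
def torneo_de_gallinas (estrategias : List (String × String)) : List (String × Int) :=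
  let d := PySem.Dict.ofList estrategias
  (d.items.foldl (fun pts p =>
    let pts := pts.insert p.1 (0 : Int)
    d.items.foldl (fun pts q =>
      if q.1 ≠ p.1 then
        if p.2 = "Me desvio siempre" then
          if q.2 = "Me la banco y no me desvio" then pts.insert p.1 (pts.getD p.1 0 - 15)
          else pts.insert p.1 (pts.getD p.1 0 - 10)
        else
          if q.2 = "Me la banco y no me desvio" then pts.insert p.1 (pts.getD p.1 0 + 5)
          else pts.insert p.1 (pts.getD p.1 0 + 10)
      else pts) pts) (PySem.Dict.empty : PySem.Dict String Int)).items

-- ===== PORT B =====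
def torneo_de_gallinas_alt (estrategias : List (String × String)) : List (String × Int) :=
  let d := PySem.Dict.ofList estrategias
  let n : Int := d.size
  let banco : Int := (d.values.filter (fun e => e == "Me la banco y no me desvio")).length
  let resto : Int := n - banco
  d.items.map (fun p =>
    (p.1, if p.2 = "Me desvio siempre" then -15 * banco - 10 * (resto - 1)
          else if p.2 = "Me la banco y no me desvio" then 5 * (banco - 1) + 10 * resto
          else 5 * banco + 10 * (resto - 1)))

-- ===== PRECONDITION & SPEC =====
def Spec_torneo_de_gallinas (estrategias : List (String × String)) (out : List (String × Int)) : Prop := out = torneo_de_gallinas_alt estrategias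
instance (estrategias : List (String × String)) (out : List (String × Int)) : Decidable (Spec_torneo_de_gallinas estrategias out) := by unfold Spec_torneo_de_gallinas; infer_instance

-- ===== CLAIM (what is proved, stated in full; the proofs are below) =====
def Claim_equal_torneo_de_gallinas : Prop := ∀ (estrategias : List (String × String)), Dom_torneo_de_gallinas estrategias → Spec_torneo_de_gallinas estrategias (torneo_de_gallinas estrategias)

-- ===== LEMMAS AND PROOFS =====

-- per-encounter increment of A's inner loop
def pvInc (e er : String) : Int :=
  if e = "Me desvio siempre" then (if er = "Me la banco y no me desvio" then -15 else -10)
  else (if er = "Me la banco y no me desvio" then 5 else 10)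

-- total A's inner loop adds for player (j, e) over opponents l
def pvDelta (e j : String) (l : List (String × String)) : Int :=
  ((l.filter (fun q => q.1 ≠ j)).map (fun q => pvInc e q.2)).sum

lemma pvInner_fold (e j : String) (l : List (String × String))
    (pts : PySem.Dict String Int) (v : Int) :
    l.foldl (fun pts q =>
      if q.1 ≠ j then
        if e = "Me desvio siempre" then
          if q.2 = "Me la banco y no me desvio" then pts.insert j (pts.getD j 0 - 15)
          else pts.insert j (pts.getD j 0 - 10)
        else
          if q.2 = "Me la banco y no me desvio" then pts.insert j (pts.getD j 0 + 5)
          else pts.insert j (pts.getD j 0 + 10)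
      else pts) (pts.insert j v)
    = pts.insert j (v + pvDelta e j l) := by
  induction l generalizing pts v with
  | nil => simp [pvDelta]
  | cons q l ih =>
    rw [List.foldl_cons]
    by_cases hq : q.1 ≠ j
    · rw [if_pos hq]
      have hd : pvDelta e j (q :: l) = pvInc e q.2 + pvDelta e j l := by
        simp [pvDelta, hq]
      by_cases h1 : e = "Me desvio siempre"
      · rw [if_pos h1]
        by_cases h2 : q.2 = "Me la banco y no me desvio"
        · rw [if_pos h2, PySem.Dict.getD_insert_self, PySem.Dict.insert_insert_self, ih, hd]
          congr 1
          simp [pvInc, h1, h2]; ring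
        · rw [if_neg h2, PySem.Dict.getD_insert_self, PySem.Dict.insert_insert_self, ih, hd]
          congr 1
          simp [pvInc, h1, h2]; ring
      · rw [if_neg h1]
        by_cases h2 : q.2 = "Me la banco y no me desvio"
        · rw [if_pos h2, PySem.Dict.getD_insert_self, PySem.Dict.insert_insert_self, ih, hd]
          congr 1
          simp [pvInc, h1, h2]; ring
        · rw [if_neg h2, PySem.Dict.getD_insert_self, PySem.Dict.insert_insert_self, ih, hd]
          congr 1
          simp [pvInc, h1, h2]; ring
    · rw [if_neg hq, ih]
      have : pvDelta e j (q :: l) = pvDelta e j l := by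
        simp [pvDelta, hq]
      rw [this]

-- total increment over ALL of l (no self-exclusion)
lemma pvSum_all (e : String) (l : List (String × String)) :
    ((l.map (fun q => pvInc e q.2)).sum)
      = (if e = "Me desvio siempre"
          then -15 * ((l.countP (fun q => q.2 == "Me la banco y no me desvio") : Int))
               - 10 * ((l.length : Int) - (l.countP (fun q => q.2 == "Me la banco y no me desvio") : Int))
          else 5 * ((l.countP (fun q => q.2 == "Me la banco y no me desvio") : Int))
               + 10 * ((l.length : Int) - (l.countP (fun q => q.2 == "Me la banco y no me desvio") : Int))) := by
  induction l with
  | nil => simp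
  | cons q l ih =>
    simp only [List.map_cons, List.sum_cons, List.countP_cons, List.length_cons, ih]
    by_cases hb : q.2 = "Me la banco y no me desvio" <;>
      by_cases hd : e = "Me desvio siempre" <;>
        simp [pvInc, hb, hd] <;> try ring

-- with distinct keys, the only self-encounter of (j, e) is itself
lemma pvFilter_self (j e : String) (l : List (String × String))
    (hnd : (l.map (fun p => p.1)).Nodup) (hmem : (j, e) ∈ l) :
    l.filter (fun q => !decide (q.1 ≠ j)) = [(j, e)] := by
  induction l with
  | nil => simp at hmem
  | cons q l ih =>
    simp only [List.map_cons, List.nodup_cons] at hnd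
    rcases List.mem_cons.mp hmem with h | h
    · subst h
      simp only [List.filter_cons, ne_eq, not_true_eq_false, decide_false, Bool.not_false,
        if_true, List.cons.injEq, true_and]
      simp
      intro a b hab haj
      exact hnd.1 (haj ▸ (List.mem_map.mpr ⟨(a, b), hab, rfl⟩))
    · have hqj : q.1 ≠ j := by
        intro hc
        exact hnd.1 (hc ▸ (List.mem_map.mpr ⟨(j, e), h, rfl⟩))
      simp only [List.filter_cons, ne_eq, hqj, not_false_eq_true, decide_true, Bool.not_true,
        if_neg, Bool.false_eq_true, not_false_eq_true]
      exact ih hnd.2 h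

lemma pvDelta_closed (j e : String) (l : List (String × String))
    (hnd : (l.map (fun p => p.1)).Nodup) (hmem : (j, e) ∈ l) :
    pvDelta e j l
      = (if e = "Me desvio siempre"
          then -15 * ((l.countP (fun q => q.2 == "Me la banco y no me desvio") : Int))
               - 10 * ((l.length : Int) - (l.countP (fun q => q.2 == "Me la banco y no me desvio") : Int))
          else 5 * ((l.countP (fun q => q.2 == "Me la banco y no me desvio") : Int))
               + 10 * ((l.length : Int) - (l.countP (fun q => q.2 == "Me la banco y no me desvio") : Int)))
        - pvInc e e := by
  have hperm : ((l.filter (fun q => decide (q.1 ≠ j)) ++ l.filter (fun q => !decide (q.1 ≠ j))).map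
      (fun q => pvInc e q.2)).sum = ((l.map (fun q => pvInc e q.2)).sum) :=
    ((List.filter_append_perm (fun q => decide (q.1 ≠ j)) l).map (fun q => pvInc e q.2)).sum_eq
  rw [List.map_append, List.sum_append, pvFilter_self j e l hnd hmem] at hperm
  simp only [List.map_cons, List.map_nil, List.sum_cons, List.sum_nil, add_zero] at hperm
  rw [← pvSum_all e l, ← hperm]
  unfold pvDelta
  ring_nf

-- ===== VERDICT (by name: the statement is the Claim_ definition above) =====
theorem torneo_de_gallinas_spec : Claim_equal_torneo_de_gallinas := by
  intro estrategias _
  unfold Spec_torneo_de_gallinas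
  simp only [torneo_de_gallinas, torneo_de_gallinas_alt]
  have hfun : (fun (pts : PySem.Dict String Int) (p : String × String) =>
      (PySem.Dict.ofList estrategias).items.foldl (fun pts q =>
        if q.1 ≠ p.1 then
          if p.2 = "Me desvio siempre" then
            if q.2 = "Me la banco y no me desvio" then pts.insert p.1 (pts.getD p.1 0 - 15)
            else pts.insert p.1 (pts.getD p.1 0 - 10)
          else
            if q.2 = "Me la banco y no me desvio" then pts.insert p.1 (pts.getD p.1 0 + 5)
            else pts.insert p.1 (pts.getD p.1 0 + 10)
        else pts) (pts.insert p.1 (0 : Int)))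
      = fun pts p => pts.insert p.1 ((0 : Int) + pvDelta p.2 p.1 (PySem.Dict.ofList estrategias).items) := by
    funext pts p
    exact pvInner_fold p.2 p.1 _ pts 0
  rw [hfun]
  have hnd : ((PySem.Dict.ofList estrategias).items.map (fun p => p.1)).Nodup := by
    have := PySem.Dict.nodup_keys_ofList (κ := String) (ν := String) estrategias
    simpa [PySem.Dict.keys] using this
  rw [PySem.Dict.items_foldl_insert_fresh (PySem.Dict.ofList estrategias).items
    (fun p => p.1) (fun p => (0 : Int) + pvDelta p.2 p.1 (PySem.Dict.ofList estrategias).items)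
    PySem.Dict.empty (fun a _ => PySem.Dict.contains_empty a.1) hnd]
  have hemp : (PySem.Dict.empty : PySem.Dict String Int).items = [] := rfl
  rw [hemp, List.nil_append]
  apply List.map_congr_left
  intro p hp
  refine Prod.ext rfl ?_
  show ((0 : Int) + pvDelta p.2 p.1 (PySem.Dict.ofList estrategias).items) = _
  have hmem : (p.1, p.2) ∈ (PySem.Dict.ofList estrategias).items := by simpa using hp
  rw [pvDelta_closed p.1 p.2 _ hnd hmem]
  have hcount : (((PySem.Dict.ofList estrategias).values.filter
      (fun e => e == "Me la banco y no me desvio")).length : Int)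
      = ((PySem.Dict.ofList estrategias).items.countP
          (fun q => q.2 == "Me la banco y no me desvio") : Int) := by
    simp [PySem.Dict.values, List.countP_eq_length_filter, List.filter_map]
    rfl
  have hlen : ((PySem.Dict.ofList estrategias).size : Int)
      = ((PySem.Dict.ofList estrategias).items.length : Int) := rfl
  rw [hcount, hlen]
  by_cases h1 : p.2 = "Me desvio siempre"
  · rw [if_pos h1, if_pos h1, h1]
    simp only [pvInc, String.reduceEq, if_false, if_true]
    ring
  · rw [if_neg h1, if_neg h1]
    by_cases h2 : p.2 = "Me la banco y no me desvio"
    · rw [if_pos h2, h2]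
      simp only [pvInc, String.reduceEq, if_false, if_true]
      ring
    · rw [if_neg h2]
      simp only [pvInc, if_neg h1, if_neg h2]
      ring
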